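-- pv_equiv track=rewrite | github.com/nestortada/AppOpti | server/utils/solver.py | find_unused_desks
-- ===== SOURCE A (Python) =====
-- from typing import Dict, Any, Tuple, List, Set
--
-- def find_unused_desks(assignments: List[Dict[str, str]], Desks: List[str], Days: List[str]) -> List[Tuple[str, str, str]]:
--     """Find desks that were not used on each day."""
--     used = {(asg['desk'], asg['day']) for asg in assignments}
--     unused = []
--     for desk in Desks:
--         for day in Days:
--             if (desk, day) not in used:
--                 unused.append((desk, day, "Este puesto no se utilizó durante toda la semana"))
--     return unused
-- ===== SOURCE B (Python) =====
-- def find_unused_desks(assignments, Desks, Days):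
--     """Find desks that were not used on each day."""
--     msg = "Este puesto no se utiliz\u00f3 durante toda la semana"
--     # Build the full (desk, day) grid, then subtract each assignment's pair from it.
--     pairs = [(desk, day) for desk in Desks for day in Days]
--     for a in assignments:
--         used = (a['desk'], a['day'])
--         pairs = [p for p in pairs if p != used]
--     return [(desk, day, msg) for desk, day in pairs]
-- ===== Notes on version B (the rewrite author's own statement) =====
-- stated objective: alternative
-- what changed: Instead of precomputing the set of used pairs and filtering while enumerating, B materialises the full desk-by-day grid first and then subtracts pairs by one filtering pass of the grid per assignment, finally attaching the message.
import Mathlib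
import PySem

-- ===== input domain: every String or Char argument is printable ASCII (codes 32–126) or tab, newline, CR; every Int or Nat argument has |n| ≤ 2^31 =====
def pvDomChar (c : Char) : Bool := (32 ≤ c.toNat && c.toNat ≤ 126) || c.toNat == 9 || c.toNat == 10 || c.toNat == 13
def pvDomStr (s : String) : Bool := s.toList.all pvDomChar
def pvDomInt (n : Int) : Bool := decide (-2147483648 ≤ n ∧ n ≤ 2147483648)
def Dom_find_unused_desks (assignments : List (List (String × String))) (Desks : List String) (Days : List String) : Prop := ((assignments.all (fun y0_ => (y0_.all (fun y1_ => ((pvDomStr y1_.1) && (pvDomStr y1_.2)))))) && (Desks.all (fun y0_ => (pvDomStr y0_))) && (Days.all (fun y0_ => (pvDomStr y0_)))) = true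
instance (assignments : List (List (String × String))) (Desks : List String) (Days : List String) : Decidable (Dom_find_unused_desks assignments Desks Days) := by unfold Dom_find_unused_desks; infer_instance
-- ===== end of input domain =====

-- B builds the full desk×day grid first and subtracts pairs by one filtering pass per
-- assignment, instead of A's precomputed used-set tested while enumerating (objective: alternative).

-- ===== PORT A =====
def find_unused_desks (assignments : List (List (String × String))) (Desks : List String) (Days : List String) : List (String × String × String) :=
  -- asg['desk'] / asg['day'] ported as getD with "" default: exact under Pre_ (both keys present)
  let used : PySem.Set (String × String) :=
    PySem.Set.ofList (assignments.map (fun asg =>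
      ((PySem.Dict.mk asg).getD "desk" "", (PySem.Dict.mk asg).getD "day" "")))
  Desks.foldl (fun unused desk =>
    Days.foldl (fun unused day =>
      if PySem.Set.contains used (desk, day) then unused
      else unused ++ [(desk, day, "Este puesto no se utilizó durante toda la semana")]) unused) []

-- ===== PORT B =====
def find_unused_desks_alt (assignments : List (List (String × String))) (Desks : List String) (Days : List String) : List (String × String × String) :=
  let msg := "Este puesto no se utilizó durante toda la semana"
  let pairs0 := Desks.flatMap (fun desk => Days.map (fun day => (desk, day)))
  let pairs := assignments.foldl (fun ps a =>
      let used := ((PySem.Dict.mk a).getD "desk" "", (PySem.Dict.mk a).getD "day" "")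
      ps.filter (fun p => p != used)) pairs0
  pairs.map (fun p => (p.1, p.2, msg))

-- ===== PRECONDITION & SPEC =====
-- Pre_ excludes exactly the inputs where A raises KeyError: some assignment lacks 'desk' or 'day'.
def Pre_find_unused_desks (assignments : List (List (String × String))) (Desks : List String) (Days : List String) : Prop :=
  assignments.all (fun asg =>
    (PySem.Dict.mk asg).contains "desk" && (PySem.Dict.mk asg).contains "day") = true

instance (assignments : List (List (String × String))) (Desks : List String) (Days : List String) : Decidable (Pre_find_unused_desks assignments Desks Days) := by unfold Pre_find_unused_desks; infer_instance

def pvWitness_find_unused_desks : (List (List (String × String))) × List String × List String :=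
  ([[("desk", "d1"), ("day", "mon")]], ["d1", "d2"], ["mon", "tue"])

def Spec_find_unused_desks (assignments : List (List (String × String))) (Desks : List String) (Days : List String) (out : List (String × String × String)) : Prop := out = find_unused_desks_alt assignments Desks Days
instance (assignments : List (List (String × String))) (Desks : List String) (Days : List String) (out : List (String × String × String)) : Decidable (Spec_find_unused_desks assignments Desks Days out) := by unfold Spec_find_unused_desks; infer_instance

-- ===== CLAIM (what is proved, stated in full; the proofs are below) =====
def Claim_equal_find_unused_desks : Prop := ∀ (assignments : List (List (String × String))) (Desks : List String) (Days : List String), Dom_find_unused_desks assignments Desks Days → Pre_find_unused_desks assignments Desks Days → Spec_find_unused_desks assignments Desks Days (find_unused_desks assignments Desks Days)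

-- ===== LEMMAS AND PROOFS =====

-- membership in the set of mapped pairs = any-scan over the source list
theorem contains_ofList_map {α β : Type} [BEq β] [LawfulBEq β] (f : α → β) (l : List α) (x : β) :
    PySem.Set.contains (PySem.Set.ofList (l.map f)) x = l.any (fun a => f a == x) := by
  cases h : l.any (fun a => f a == x) with
  | true =>
      simp only [List.any_eq_true, beq_iff_eq] at h
      obtain ⟨a, ha, rfl⟩ := h
      simp [PySem.Set.mem_ofList, List.mem_map]
      exact ⟨a, ha, rfl⟩
  | false =>
      simp only [List.any_eq_false, beq_iff_eq] at h
      simp only [Bool.eq_false_iff, ne_eq]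
      intro hc
      rw [PySem.Set.contains_iff, PySem.Set.mem_ofList, List.mem_map] at hc
      obtain ⟨a, ha, rfl⟩ := hc
      exact h a ha rfl

-- append-if foldl = flatMap with singleton/empty branches
theorem foldl1_eq_flatMap {β γ : Type} (c : β → Bool) (g : β → γ)
    (Days : List β) (acc : List γ) :
    Days.foldl (fun u day => if c day then u else u ++ [g day]) acc
    = acc ++ Days.flatMap (fun day => if c day then [] else [g day]) := by
  induction Days generalizing acc with
  | nil => simp
  | cons y ys ihy =>
      simp only [List.foldl_cons, List.flatMap_cons]
      rw [ihy]
      by_cases h : c y = true <;> simp [h]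

-- nested version
theorem foldl2_eq_flatMap {α β γ : Type} (cond : α → β → Bool) (f : α → β → γ)
    (Desks : List α) (Days : List β) (acc : List γ) :
    Desks.foldl (fun u desk =>
      Days.foldl (fun u day => if cond desk day then u else u ++ [f desk day]) u) acc
    = acc ++ Desks.flatMap (fun desk =>
        Days.flatMap (fun day => if cond desk day then [] else [f desk day])) := by
  simp only [foldl1_eq_flatMap]
  exact PySem.List.foldl_append_eq_flatMap _ _ _

-- a foldl of per-element filters = one filter with the conjunction of all tests
theorem foldl_filter_eq_filter_all {α β : Type} [BEq β] (key : α → β)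
    (l : List α) (g : List β) :
    l.foldl (fun ps a => ps.filter (fun p => p != key a)) g
    = g.filter (fun p => l.all (fun a => p != key a)) := by
  induction l generalizing g with
  | nil => simp
  | cons a as ih =>
      simp only [List.foldl_cons, List.all_cons]
      rw [ih, List.filter_filter]
      apply List.filter_congr
      intro p _
      exact Bool.and_comm _ _

-- filter-then-map = flatMap with singleton/empty branches
theorem filter_map_eq_flatMap {β γ : Type} (c : β → Bool) (f : β → γ) (l : List β) :
    (l.filter c).map f = l.flatMap (fun x => if c x then [f x] else []) := by
  induction l with
  | nil => rfl
  | cons x xs ih =>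
      by_cases h : c x = true <;> simp [h, ih]

-- ===== VERDICT (by name: the statement is the Claim_ definition above) =====
theorem find_unused_desks_spec : Claim_equal_find_unused_desks := by
  intro assignments Desks Days _ _
  unfold Spec_find_unused_desks find_unused_desks find_unused_desks_alt
  simp only []
  rw [foldl2_eq_flatMap
        (fun desk day => PySem.Set.contains
          (PySem.Set.ofList (assignments.map (fun asg =>
            ((PySem.Dict.mk asg).getD "desk" "", (PySem.Dict.mk asg).getD "day" ""))))
          (desk, day))
        (fun desk day => (desk, day, "Este puesto no se utilizó durante toda la semana"))]
  rw [foldl_filter_eq_filter_all, filter_map_eq_flatMap]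
  simp only [List.nil_append, List.flatMap_assoc, List.flatMap_map]
  congr 1
  funext desk
  congr 1
  funext day
  rw [contains_ofList_map]
  cases h : assignments.all (fun a =>
      (desk, day) != ((PySem.Dict.mk a).getD "desk" "", (PySem.Dict.mk a).getD "day" "")) with
  | true =>
      have ha : assignments.any (fun a =>
          ((PySem.Dict.mk a).getD "desk" "", (PySem.Dict.mk a).getD "day" "") == (desk, day)) = false := by
        simp only [List.all_eq_true, bne_iff_ne, ne_eq] at h
        simp only [List.any_eq_false, beq_iff_eq]
        intro a hma heq
        exact h a hma heq.symm
      simp [ha]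
  | false =>
      have ha : assignments.any (fun a =>
          ((PySem.Dict.mk a).getD "desk" "", (PySem.Dict.mk a).getD "day" "") == (desk, day)) = true := by
        simp only [List.all_eq_false] at h
        obtain ⟨a, hma, hne⟩ := h
        simp only [bne_iff_ne, ne_eq, Decidable.not_not] at hne
        simp only [List.any_eq_true, beq_iff_eq]
        exact ⟨a, hma, hne.symm⟩
      simp [ha]
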